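-- pv_equiv track=rewrite | github.com/MonikaChris/advent-code | dec-2023/Day14/day14_part2.py | hash_cols
-- ===== SOURCE A (Python) =====
-- def hash_cols(grid, row_start, row_end, row_step):
--   COLS = len(grid[0])
--
--   cols = {} # c : [(O count, # row index)...]
--
--   for c in range(COLS):
--     cols[c] = []
--     o_count = 0
--     for r in range(row_start, row_end, row_step):
--       if grid[r][c] == "O":
--         o_count += 1
--       if grid[r][c] == "#":
--         cols[c].append((o_count, r))
--         o_count = 0
--     if o_count > 0:
--       cols[c].append((o_count, -1))
--   return cols
-- ===== SOURCE B (Python) =====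
-- # Row-major re-implementation: one pass over rows maintaining per-column accumulators.
-- def hash_cols(grid, row_start, row_end, row_step):
--   COLS = len(grid[0])
--   states = [([], 0) for _ in range(COLS)]
--   for r in range(row_start, row_end, row_step):
--     row = grid[r]
--     states = [_step(st, row[c], r) for c, st in enumerate(states)]
--   return {c: lst + [(o, -1)] if o > 0 else lst for c, (lst, o) in enumerate(states)}
--
-- def _step(st, cell, r):
--   lst, o = st
--   if cell == "O":
--     return (lst, o + 1)
--   if cell == "#":
--     return (lst + [(o, r)], 0)
--   return st
-- ===== Notes on version B (the rewrite author's own statement) =====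
-- stated objective: alternative
-- what changed: Interchanged the loop nesting: instead of A's outer loop over columns each rescanning the row range, B makes a single pass over the rows maintaining a per-column list of (rock-count, wall-row) accumulators, finalizing all columns at the end.
-- outside the precondition, e.g. on hash_cols([[], []], 0, 2, 0): A returns {}, B raises ValueError; on hash_cols([[]], 0, 5, 1): A returns {}, B raises IndexError
import Mathlib
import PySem

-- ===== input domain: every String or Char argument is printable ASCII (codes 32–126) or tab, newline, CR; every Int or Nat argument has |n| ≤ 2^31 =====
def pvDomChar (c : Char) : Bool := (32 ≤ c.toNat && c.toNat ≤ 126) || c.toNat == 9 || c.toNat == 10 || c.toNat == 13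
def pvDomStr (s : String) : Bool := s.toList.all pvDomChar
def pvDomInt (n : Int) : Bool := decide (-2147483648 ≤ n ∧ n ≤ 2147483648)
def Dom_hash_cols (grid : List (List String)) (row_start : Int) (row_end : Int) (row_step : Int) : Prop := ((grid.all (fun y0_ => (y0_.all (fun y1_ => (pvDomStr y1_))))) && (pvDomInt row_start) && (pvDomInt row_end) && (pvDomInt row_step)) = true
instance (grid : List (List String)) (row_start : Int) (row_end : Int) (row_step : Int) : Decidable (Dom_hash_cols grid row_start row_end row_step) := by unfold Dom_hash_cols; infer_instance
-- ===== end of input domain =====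

-- B interchanges the loop nesting: a single pass over the rows maintaining one accumulator per column,
-- instead of A's column-by-column rescans of the rows (objective: alternative decomposition, same cost).


-- ===== PORT A =====
-- literal port of A: outer loop over columns c, inner loop over the row range,
-- local o_count, cols[c] appended in place (fresh distinct keys 0..COLS-1, so the
-- dict is the association list built by appending one entry per column).
def hash_cols (grid : List (List String)) (row_start : Int) (row_end : Int) (row_step : Int) : List (Int × List (Int × Int)) :=
  let COLS := grid.headI.length
  (PySem.List.pyRange 0 (COLS : Int) 1).foldl (fun cols c =>
    let p := (PySem.List.pyRange row_start row_end row_step).foldl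
      (fun (p : List (Int × Int) × Int) r =>
        let cell := PySem.List.pyGetD (PySem.List.pyGetD grid r []) c ""
        let o := if cell = "O" then p.2 + 1 else p.2
        if cell = "#" then (p.1 ++ [(o, r)], 0) else (p.1, o))
      ([], 0)
    cols ++ [(c, if p.2 > 0 then p.1 ++ [(p.2, -1)] else p.1)]) []

-- ===== PORT B =====
-- port of Source B's helper _step
def pvStep (st : List (Int × Int) × Int) (cell : String) (r : Int) : List (Int × Int) × Int :=
  if cell = "O" then (st.1, st.2 + 1)
  else if cell = "#" then (st.1 ++ [(st.2, r)], 0)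
  else st

-- port of Source B: one fold over the rows updating the whole per-column state list
def hash_cols_alt (grid : List (List String)) (row_start : Int) (row_end : Int) (row_step : Int) : List (Int × List (Int × Int)) :=
  let COLS := grid.headI.length
  let states := (PySem.List.pyRange row_start row_end row_step).foldl
    (fun (states : List (List (Int × Int) × Int)) r =>
      let row := PySem.List.pyGetD grid r []
      (PySem.List.enumerate states).map (fun p => pvStep p.2 (PySem.List.pyGetD row p.1 "") r))
    (List.replicate COLS ([], 0))
  (PySem.List.enumerate states).map (fun p => (p.1, if p.2.2 > 0 then p.2.1 ++ [(p.2.2, -1)] else p.2.1))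

-- ===== PRECONDITION & SPEC =====
-- Pre_ excludes inputs where Python raises: empty grid (IndexError on grid[0]), zero step
-- (ValueError), and a visited row index out of range or shorter than row 0 (IndexError).
-- In the degenerate zero-column case A skips the row loop and returns {} while B still
-- builds the range and indexes the rows, so a few such A-returning inputs are excluded too.
-- number of iterations of range(a, b, s) in closed arithmetic form (no list is built)
def pvIterCount (a b s : Int) : Int :=
  if 0 < s then max 0 (PySem.Int.floordiv (b - a + s - 1) s)
  else max 0 (PySem.Int.floordiv (a - b + (-s) - 1) (-s))

-- The count bound adds nothing: distinct in-range indices number at most 2*len(grid);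
-- it only lets the condition be decided without enumerating a huge range.
def Pre_hash_cols (grid : List (List String)) (row_start : Int) (row_end : Int) (row_step : Int) : Prop :=
  grid ≠ [] ∧ row_step ≠ 0 ∧
    pvIterCount row_start row_end row_step ≤ 2 * (grid.length : Int) ∧
    ∀ r ∈ PySem.List.pyRange row_start row_end row_step,
      PySem.Raise.InRange grid.length r ∧ grid.headI.length ≤ (PySem.List.pyGetD grid r []).length
instance (grid : List (List String)) (row_start : Int) (row_end : Int) (row_step : Int) : Decidable (Pre_hash_cols grid row_start row_end row_step) := by unfold Pre_hash_cols; infer_instance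

def pvWitness_hash_cols : List (List String) × Int × Int × Int := ([["O", "#"], [".", "O"]], 0, 2, 1)

def Spec_hash_cols (grid : List (List String)) (row_start : Int) (row_end : Int) (row_step : Int) (out : List (Int × List (Int × Int))) : Prop := out = hash_cols_alt grid row_start row_end row_step
instance (grid : List (List String)) (row_start : Int) (row_end : Int) (row_step : Int) (out : List (Int × List (Int × Int))) : Decidable (Spec_hash_cols grid row_start row_end row_step out) := by unfold Spec_hash_cols; infer_instance

-- ===== CLAIM (what is proved, stated in full; the proofs are below) =====
def Claim_equal_hash_cols : Prop := ∀ (grid : List (List String)) (row_start : Int) (row_end : Int) (row_step : Int), Dom_hash_cols grid row_start row_end row_step → Pre_hash_cols grid row_start row_end row_step → Spec_hash_cols grid row_start row_end row_step (hash_cols grid row_start row_end row_step)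

-- ===== LEMMAS AND PROOFS =====

-- enumerating a position-preserving map keeps the indices
theorem pv_enum_map {α β : Type} (xs : List α) (s : Int) (g : Int → α → β) :
    PySem.List.enumerate ((PySem.List.enumerate xs s).map (fun p => g p.1 p.2)) s
      = (PySem.List.enumerate xs s).map (fun p => (p.1, g p.1 p.2)) := by
  induction xs generalizing s with
  | nil => simp [PySem.List.enumerate_nil]
  | cons x xs ih => simp [PySem.List.enumerate_cons, ih]

-- interchange lemma: folding the rows over the whole state list = per-column row folds
theorem pv_rows_fold {S : Type} (g : Int → Int → S → S) (R : List Int) (states : List S) (s : Int) :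
    R.foldl (fun sts r => (PySem.List.enumerate sts s).map (fun p => g r p.1 p.2)) states
      = (PySem.List.enumerate states s).map (fun p => R.foldl (fun st r => g r p.1 st) p.2) := by
  induction R generalizing states with
  | nil => simp [PySem.List.map_snd_enumerate]
  | cons r R ih =>
    simp only [List.foldl_cons]
    rw [ih, pv_enum_map, List.map_map]
    rfl

theorem pv_enum_replicate {α : Type} (n : Nat) (a : α) (s : Int) :
    PySem.List.enumerate (List.replicate n a) s = (List.range n).map (fun (k : Nat) => (s + (k : Int), a)) := by
  induction n generalizing s with
  | zero => simp [PySem.List.enumerate_nil]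
  | succ m ih =>
    rw [List.replicate_succ, PySem.List.enumerate_cons, ih, List.range_succ_eq_map, List.map_cons, List.map_map]
    refine congrArg₂ List.cons (by simp) ?_
    apply List.map_congr_left
    intro k _
    simp [Function.comp]
    omega

theorem hash_cols_eq_alt (grid : List (List String)) (row_start row_end row_step : Int) :
    hash_cols grid row_start row_end row_step = hash_cols_alt grid row_start row_end row_step := by
  have hbody : ∀ c : Int,
      (fun (p : List (Int × Int) × Int) (r : Int) =>
        if PySem.List.pyGetD (PySem.List.pyGetD grid r []) c "" = "#" then
          (p.1 ++ [(if PySem.List.pyGetD (PySem.List.pyGetD grid r []) c "" = "O" then p.2 + 1 else p.2, r)], 0)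
        else (p.1, if PySem.List.pyGetD (PySem.List.pyGetD grid r []) c "" = "O" then p.2 + 1 else p.2))
      = (fun (p : List (Int × Int) × Int) (r : Int) =>
          pvStep p (PySem.List.pyGetD (PySem.List.pyGetD grid r []) c "") r) := by
    intro c; funext p r
    simp only [pvStep]
    split_ifs <;> simp_all
  unfold hash_cols hash_cols_alt
  dsimp only
  rw [pv_rows_fold (fun r c st => pvStep st (PySem.List.pyGetD (PySem.List.pyGetD grid r []) c "") r),
      pv_enum_map (List.replicate grid.headI.length (([] : List (Int × Int)), (0 : Int))) 0
        (fun c st => List.foldl (fun st r => pvStep st (PySem.List.pyGetD (PySem.List.pyGetD grid r []) c "") r) st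
          (PySem.List.pyRange row_start row_end row_step)),
      List.map_map, pv_enum_replicate, List.map_map,
      PySem.List.pyRange_zero_nat, PySem.List.foldl_append_singleton_eq_map, List.map_map]
  simp only [List.nil_append]
  apply List.map_congr_left
  intro k _
  simp only [Function.comp, zero_add]
  rw [hbody ((k : Int))]

-- ===== VERDICT (by name: the statement is the Claim_ definition above) =====
theorem hash_cols_spec : Claim_equal_hash_cols := by
  intro grid row_start row_end row_step _ _
  unfold Spec_hash_cols
  exact hash_cols_eq_alt grid row_start row_end row_step
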